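-- pv_equiv track=rewrite | github.com/alex-mf-06/ayed1-2025-tps1 | TP4/EJ6.py | subcadena_sin_rebandas
-- ===== SOURCE A (Python) =====
-- def subcadena_sin_rebandas(cadena: str) -> str:
--     """
--
--     La funcion debe dar la subcadena que seria la ultima palabra de la cadena.
--     precondiciones: el parametro recibido debe ser un string
--     postcondiciones: retorna la subcadena que seria la ultima palabra de la cadena.
--
--     """
--     try:
--         cadena= str(cadena)
--         cadena = cadena.split()
--         ultimo_elemento = len(cadena) - 1
--         for cad in cadena:
--             if cad == cadena[ultimo_elemento]:
--                 return cad
--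
--     except TypeError:
--         raise TypeError("la cadena debe ser un str")
-- ===== SOURCE B (Python) =====
-- def subcadena_sin_rebandas(cadena: str) -> str:
--     palabras = str(cadena).split()
--     if palabras:
--         return palabras[-1]
--     return None
-- ===== Notes on version B (the rewrite author's own statement) =====
-- stated objective: simpler
-- what changed: The first word equal to the last word is always the last word itself, so B drops the comparison loop and returns words[-1] directly (closed-form indexing instead of a scan).
-- outside the precondition, e.g. on subcadena_sin_rebandas('   '): A returns None, B returns None
import Mathlib
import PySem

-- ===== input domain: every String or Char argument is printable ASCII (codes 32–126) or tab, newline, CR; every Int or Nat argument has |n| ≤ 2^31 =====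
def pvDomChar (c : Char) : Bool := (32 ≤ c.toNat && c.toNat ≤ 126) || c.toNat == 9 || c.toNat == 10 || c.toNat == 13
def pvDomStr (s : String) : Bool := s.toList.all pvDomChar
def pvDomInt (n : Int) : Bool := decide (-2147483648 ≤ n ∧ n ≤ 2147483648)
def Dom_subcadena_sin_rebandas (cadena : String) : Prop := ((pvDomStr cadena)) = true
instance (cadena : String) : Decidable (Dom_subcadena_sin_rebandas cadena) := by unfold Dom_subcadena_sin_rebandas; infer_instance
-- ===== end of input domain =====

-- B: the first word equal to the last word is always the last word itself, so B returns words[-1] directly (simpler).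
-- ===== PORT A =====
def subcadena_sin_rebandas (cadena : String) : String :=
  let ws := PySem.Str.split₀ cadena
  let ultimo_elemento : Int := (ws.length : Int) - 1
  -- for cad in ws: if cad == ws[ultimo_elemento]: return cad   (fall-through returns None, excluded by Pre_)
  (ws.find? (fun cad => some cad == PySem.List.pyGet? ws ultimo_elemento)).getD ""

-- ===== PORT B =====
def subcadena_sin_rebandas_alt (cadena : String) : String :=
  let palabras := PySem.Str.split₀ cadena
  -- if palabras: return palabras[-1]   (else None, excluded by Pre_)
  (PySem.List.pyGet? palabras (-1)).getD ""

-- ===== PRECONDITION & SPEC =====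
-- Pre_ excludes strings with no words (empty/whitespace-only), on which A returns None, not a str.
def Pre_subcadena_sin_rebandas (cadena : String) : Prop := PySem.Str.split₀ cadena ≠ []
instance (cadena : String) : Decidable (Pre_subcadena_sin_rebandas cadena) := by unfold Pre_subcadena_sin_rebandas; infer_instance
def pvWitness_subcadena_sin_rebandas : String := "hola mundo"
def Spec_subcadena_sin_rebandas (cadena : String) (out : String) : Prop := out = subcadena_sin_rebandas_alt cadena
instance (cadena : String) (out : String) : Decidable (Spec_subcadena_sin_rebandas cadena out) := by unfold Spec_subcadena_sin_rebandas; infer_instance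

-- ===== CLAIM =====
def Claim_equal_subcadena_sin_rebandas : Prop := ∀ (cadena : String), Dom_subcadena_sin_rebandas cadena → Pre_subcadena_sin_rebandas cadena → Spec_subcadena_sin_rebandas cadena (subcadena_sin_rebandas cadena)

-- ===== LEMMAS AND PROOFS =====
theorem find?_eq_last {ws : List String} {w : String} (h : ws.getLast? = some w) :
    ws.find? (fun cad => some cad == some w) = some w := by
  have hmem : w ∈ ws := List.mem_of_getLast? h
  have hsome : (ws.find? (fun cad => some cad == some w)).isSome := by
    apply List.find?_isSome.mpr
    exact ⟨w, hmem, by simp⟩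
  obtain ⟨r, hr⟩ := Option.isSome_iff_exists.mp hsome
  have := List.find?_some hr
  simp at this
  rw [hr, this]

-- ===== VERDICT =====
theorem subcadena_sin_rebandas_spec : Claim_equal_subcadena_sin_rebandas := by
  intro cadena _ hpre
  unfold Spec_subcadena_sin_rebandas subcadena_sin_rebandas subcadena_sin_rebandas_alt
  simp only
  set ws := PySem.Str.split₀ cadena with hws
  obtain ⟨w, hw⟩ := Option.isSome_iff_exists.mp (List.getLast?_isSome.mpr hpre)
  have hlen : ws.length ≠ 0 := by simpa using List.length_pos_of_ne_nil hpre |>.ne'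
  have hcast : ((ws.length : Int) - 1) = ((ws.length - 1 : Nat) : Int) := by omega
  have hget : PySem.List.pyGet? ws ((ws.length : Int) - 1) = some w := by
    rw [hcast, PySem.List.pyGet?_natCast]
    rw [← hw, List.getLast?_eq_getElem?]
  rw [hget, PySem.List.pyGet?_neg_one, hw, find?_eq_last hw]
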